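-- pv_equiv track=rewrite | github.com/TJEWH/Object-Centric-Super-Variants | Inter_Lane_Alignment.py | __combine_interactions
-- ===== SOURCE A (Python) =====
-- def __combine_interactions(mappings):
--     '''
--     Combines interaction points that share at least one common activity.
--     :param mappings: The mappings of original interaction points to new indices in the summarized lanes for each lane in the Super Variant
--     :type mappings: dict
--     :return: Each combined interaction point of the final Super Lanes and their current positions in the involved lanes
--     :rtype: dict
--     '''
--     new_mappings = dict()
--     added_keys = []
--
--     for interaction in mappings.keys():
--         share_elements = dict()
--         share_elements[interaction] = mappings[interaction]
--
--         for other_interaction in mappings.keys():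
--             if(other_interaction != interaction):
--
--                 for lane in mappings[interaction]:
--                     if(lane in mappings[other_interaction].keys()):
--                         if(mappings[other_interaction][lane] == mappings[interaction][lane]):
--                             share_elements[other_interaction] = mappings[other_interaction]
--                             break
--         if(len(share_elements) == 1):
--             new_mappings[interaction] = mappings[interaction]
--             added_keys.append(interaction)
--
--         else:
--             if(not interaction in added_keys):
--                 positions = dict()
--
--                 for key in share_elements.keys():
--                     added_keys.append(key)
--
--                     for lane in share_elements[key]:
--                         positions[lane] = share_elements[key][lane]
--
--                 new_mappings[interaction] = positions
--
--     return new_mappings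
-- ===== SOURCE B (Python) =====
-- def __combine_interactions(mappings):
--     # Reverse index (lane, position) -> set of interactions containing that pair,
--     # so sharing neighbours are found by set lookups instead of rescanning all
--     # interactions (and all their lanes) for every interaction point.
--     index = {}
--     for key, lanes in mappings.items():
--         for pair in lanes.items():
--             index.setdefault(pair, set()).add(key)
--
--     new_mappings = {}
--     added = set()
--     for interaction, lanes in mappings.items():
--         neighbors = set()
--         for pair in lanes.items():
--             neighbors |= index[pair]
--         neighbors.discard(interaction)
--
--         if not neighbors:
--             new_mappings[interaction] = lanes
--         elif interaction not in added:
--             positions = dict(lanes)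
--             for other in mappings:
--                 if other in neighbors:
--                     positions.update(mappings[other])
--             new_mappings[interaction] = positions
--             added |= neighbors
--     return new_mappings
-- ===== Notes on version B (the rewrite author's own statement) =====
-- stated objective: faster
-- what changed: Replaces A's per-interaction rescan of every other interaction's lane dict with a reverse index (lane,position)->interactions built once, so sharing neighbours come from set unions and an O(1) membership test.
import Mathlib
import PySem

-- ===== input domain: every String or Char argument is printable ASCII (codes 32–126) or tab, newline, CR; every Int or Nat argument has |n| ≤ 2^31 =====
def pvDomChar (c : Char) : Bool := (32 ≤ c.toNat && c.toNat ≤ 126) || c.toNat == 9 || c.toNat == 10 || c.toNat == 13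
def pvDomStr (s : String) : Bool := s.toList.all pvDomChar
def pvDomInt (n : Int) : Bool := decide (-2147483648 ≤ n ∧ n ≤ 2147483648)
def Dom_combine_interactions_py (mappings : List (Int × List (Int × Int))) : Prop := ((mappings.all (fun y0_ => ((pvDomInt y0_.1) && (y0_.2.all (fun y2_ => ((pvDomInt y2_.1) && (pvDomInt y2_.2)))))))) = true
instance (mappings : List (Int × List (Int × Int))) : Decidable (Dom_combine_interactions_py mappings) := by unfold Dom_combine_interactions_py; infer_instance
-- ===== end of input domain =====

-- B replaces A's all-pairs neighbour rescan by a reverse index (lane,position) → set of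
-- interactions, built once; the return value is proved identical (faster objective).

-- ===== PORT A =====
-- the inner `for lane in mappings[interaction]` loop with its break:
-- scans the lanes (keys) of interaction i, true as soon as the other dict maps some lane to the same value
def pvShareScan (mI mO : PySem.Dict Int Int) (lanes : List Int) : Bool :=
  match lanes with
  | [] => false
  | lane :: rest =>
    match mO.get? lane, mI.get? lane with
    | some w, some v => if w == v then true else pvShareScan mI mO rest
    | _, _ => pvShareScan mI mO rest

-- the `share_elements` dict built by the `for other_interaction in mappings.keys()` loop
def pvShare (mappings : List (Int × List (Int × Int))) (p : Int × List (Int × Int)) :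
    PySem.Dict Int (PySem.Dict Int Int) :=
  mappings.foldl
    (fun se q =>
      if q.1 == p.1 then se
      else if pvShareScan (PySem.Dict.mk p.2) (PySem.Dict.mk q.2) (PySem.Dict.mk p.2).keys then
        se.insert q.1 (PySem.Dict.mk q.2)
      else se)
    (PySem.Dict.empty.insert p.1 (PySem.Dict.mk p.2))

-- one body of the outer `for interaction in mappings.keys()` loop; state = (new_mappings, added_keys)
def pvAStep (mappings : List (Int × List (Int × Int)))
    (st : PySem.Dict Int (PySem.Dict Int Int) × List Int)
    (p : Int × List (Int × Int)) : PySem.Dict Int (PySem.Dict Int Int) × List Int :=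
  let share := pvShare mappings p
  if share.size = 1 then
    (st.1.insert p.1 (PySem.Dict.mk p.2), st.2 ++ [p.1])
  else if p.1 ∈ st.2 then st
  else
    -- `for key in share_elements: added_keys.append(key); for lane in share_elements[key]: positions[lane] = …`
    let r := share.items.foldl
      (fun (st2 : List Int × PySem.Dict Int Int) q =>
        (st2.1 ++ [q.1], q.2.items.foldl (fun pos lp => pos.insert lp.1 lp.2) st2.2))
      (st.2, PySem.Dict.empty)
    (st.1.insert p.1 r.2, r.1)

def combine_interactions_py (mappings : List (Int × List (Int × Int))) : List (Int × List (Int × Int)) :=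
  ((mappings.foldl (pvAStep mappings) (PySem.Dict.empty, [])).1).items.map (fun q => (q.1, q.2.items))

-- ===== PORT B =====
-- reverse index (lane, position) → set of interactions containing that pair
def pvIndex (mappings : List (Int × List (Int × Int))) : PySem.Dict (Int × Int) (PySem.Set Int) :=
  mappings.foldl
    (fun idx p => p.2.foldl
      (fun idx lp => idx.insert lp ((idx.getD lp PySem.Set.empty).add p.1)) idx)
    PySem.Dict.empty

-- the neighbour set of one interaction: union of the index entries of its pairs, minus itself
def pvNeighbors (index : PySem.Dict (Int × Int) (PySem.Set Int)) (p : Int × List (Int × Int)) :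
    PySem.Set Int :=
  PySem.Set.discard
    (p.2.foldl (fun s lp => PySem.Set.union s (index.getD lp PySem.Set.empty)) PySem.Set.empty)
    p.1

-- one body of B's main loop; state = (new_mappings, added : set)
def pvBStep (mappings : List (Int × List (Int × Int)))
    (index : PySem.Dict (Int × Int) (PySem.Set Int))
    (st : PySem.Dict Int (PySem.Dict Int Int) × PySem.Set Int)
    (p : Int × List (Int × Int)) : PySem.Dict Int (PySem.Dict Int Int) × PySem.Set Int :=
  let neighbors := pvNeighbors index p
  if neighbors.isEmpty then (st.1.insert p.1 (PySem.Dict.mk p.2), st.2)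
  else if PySem.Set.contains st.2 p.1 then st
  else
    let positions := mappings.foldl
      (fun pos q => if PySem.Set.contains neighbors q.1 then pos.update q.2 else pos)
      (PySem.Dict.mk p.2)
    (st.1.insert p.1 positions, PySem.Set.union st.2 neighbors)

def combine_interactions_py_alt (mappings : List (Int × List (Int × Int))) : List (Int × List (Int × Int)) :=
  let index := pvIndex mappings
  ((mappings.foldl (pvBStep mappings index) (PySem.Dict.empty, PySem.Set.empty)).1).items.map
    (fun q => (q.1, q.2.items))

-- ===== PRECONDITION & SPEC =====
-- `mappings` encodes a Python dict of dicts, so its outer keys and the lane keys of each inner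
-- dict are distinct; association lists with duplicate keys do not arise from any Python input.
def Pre_combine_interactions_py (mappings : List (Int × List (Int × Int))) : Prop :=
  (mappings.map Prod.fst).Nodup ∧ ∀ p ∈ mappings, (p.2.map Prod.fst).Nodup
instance (mappings : List (Int × List (Int × Int))) : Decidable (Pre_combine_interactions_py mappings) := by
  unfold Pre_combine_interactions_py; infer_instance

def pvWitness_combine_interactions_py : (List (Int × List (Int × Int))) :=
  [(0, [(1, 2)]), (3, [(1, 2), (4, 5)]), (6, [(4, 7)])]

def Spec_combine_interactions_py (mappings : List (Int × List (Int × Int))) (out : List (Int × List (Int × Int))) : Prop := out = combine_interactions_py_alt mappings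
instance (mappings : List (Int × List (Int × Int))) (out : List (Int × List (Int × Int))) : Decidable (Spec_combine_interactions_py mappings out) := by unfold Spec_combine_interactions_py; infer_instance

-- ===== CLAIM (what is proved, stated in full; the proofs are below) =====
def Claim_equal_combine_interactions_py : Prop := ∀ (mappings : List (Int × List (Int × Int))), Dom_combine_interactions_py mappings → Pre_combine_interactions_py mappings → Spec_combine_interactions_py mappings (combine_interactions_py mappings)

-- ===== LEMMAS AND PROOFS =====

-- distinct first components determine the pair
theorem pvUniq {α β : Type} [DecidableEq α] {l : List (α × β)} (h : (l.map Prod.fst).Nodup)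
    {q q' : α × β} (hq : q ∈ l) (hq' : q' ∈ l) (he : q.1 = q'.1) : q = q' := by
  induction l with
  | nil => cases hq
  | cons a t ih =>
    simp only [List.map_cons, List.nodup_cons] at h
    rcases List.mem_cons.1 hq with h1 | h1 <;> rcases List.mem_cons.1 hq' with h2 | h2
    · rw [h1, h2]
    · exfalso
      have hm := List.mem_map_of_mem (f := Prod.fst) h2
      rw [← he, h1] at hm
      exact h.1 hm
    · exfalso
      have hm := List.mem_map_of_mem (f := Prod.fst) h1
      rw [he, h2] at hm
      exact h.1 hm
    · exact ih h.2 h1 h2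

theorem pvShareScan_iff (mI mO : PySem.Dict Int Int) (lanes : List Int) :
    pvShareScan mI mO lanes = true ↔ ∃ l ∈ lanes, ∃ v, mI.get? l = some v ∧ mO.get? l = some v := by
  induction lanes with
  | nil => simp [pvShareScan]
  | cons lane rest ih =>
    rw [pvShareScan]
    rcases ho : mO.get? lane with _ | w <;> rcases hi : mI.get? lane with _ | v
    · simp only [ih]
      constructor
      · rintro ⟨l, hl, v, h1, h2⟩; exact ⟨l, List.mem_cons_of_mem _ hl, v, h1, h2⟩
      · rintro ⟨l, hl, v, h1, h2⟩
        rcases List.mem_cons.1 hl with rfl | hl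
        · rw [hi] at h1; cases h1
        · exact ⟨l, hl, v, h1, h2⟩
    · simp only [ih]
      constructor
      · rintro ⟨l, hl, v', h1, h2⟩; exact ⟨l, List.mem_cons_of_mem _ hl, v', h1, h2⟩
      · rintro ⟨l, hl, v', h1, h2⟩
        rcases List.mem_cons.1 hl with rfl | hl
        · rw [ho] at h2; cases h2
        · exact ⟨l, hl, v', h1, h2⟩
    · simp only [ih]
      constructor
      · rintro ⟨l, hl, v', h1, h2⟩; exact ⟨l, List.mem_cons_of_mem _ hl, v', h1, h2⟩
      · rintro ⟨l, hl, v', h1, h2⟩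
        rcases List.mem_cons.1 hl with rfl | hl
        · rw [hi] at h1; cases h1
        · exact ⟨l, hl, v', h1, h2⟩
    · by_cases he : w = v
      · subst he
        simp only [beq_self_eq_true, if_true]
        constructor
        · intro _; exact ⟨lane, List.mem_cons_self, w, hi, ho⟩
        · intro _; trivial
      · simp only [beq_iff_eq, he, if_false, ih]
        constructor
        · rintro ⟨l, hl, v', h1, h2⟩; exact ⟨l, List.mem_cons_of_mem _ hl, v', h1, h2⟩
        · rintro ⟨l, hl, v', h1, h2⟩
          rcases List.mem_cons.1 hl with rfl | hl
          · rw [hi] at h1; rw [ho] at h2; cases h1; cases h2; exact absurd rfl he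
          · exact ⟨l, hl, v', h1, h2⟩

-- get? on a literal dict with distinct keys is list membership
theorem pvGetMk (li : List (Int × Int)) (hli : (li.map Prod.fst).Nodup) (l v : Int) :
    (PySem.Dict.mk li).get? l = some v ↔ (l, v) ∈ li := by
  have := PySem.Dict.get?_eq_some_iff_mem_items (PySem.Dict.mk li) l v
    (by simpa [PySem.Dict.keys_mk] using hli)
  simpa using this

theorem pvScan_iff (li : List (Int × Int)) (hli : (li.map Prod.fst).Nodup)
    (mO : PySem.Dict Int Int) :
    pvShareScan (PySem.Dict.mk li) mO (PySem.Dict.mk li).keys = true ↔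
      ∃ lp ∈ li, mO.get? lp.1 = some lp.2 := by
  rw [pvShareScan_iff]
  constructor
  · rintro ⟨l, _, v, h1, h2⟩
    exact ⟨(l, v), (pvGetMk li hli l v).1 h1, h2⟩
  · rintro ⟨lp, hlp, h2⟩
    refine ⟨lp.1, ?_, lp.2, (pvGetMk li hli lp.1 lp.2).2 ?_, h2⟩
    · simpa [PySem.Dict.keys_mk] using List.mem_map_of_mem (f := Prod.fst) hlp
    · simpa using hlp

theorem pvIndexInner (li : List (Int × Int)) (j : Int) (lp : Int × Int) (k : Int)
    (idx : PySem.Dict (Int × Int) (PySem.Set Int)) :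
    k ∈ (li.foldl (fun idx lp' => idx.insert lp' ((idx.getD lp' PySem.Set.empty).add j)) idx).getD lp PySem.Set.empty
      ↔ k ∈ idx.getD lp PySem.Set.empty ∨ (k = j ∧ lp ∈ li) := by
  induction li generalizing idx with
  | nil => simp
  | cons l0 rest ih =>
    simp only [List.foldl_cons, ih, PySem.Dict.getD_insert, List.mem_cons]
    by_cases h : lp = l0
    · simp [h, PySem.Set.mem_add]; tauto
    · simp [h]
      try tauto

theorem pvIndexFold (ms : List (Int × List (Int × Int))) (lp : Int × Int) (k : Int)
    (idx : PySem.Dict (Int × Int) (PySem.Set Int)) :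
    k ∈ (ms.foldl
      (fun idx p => p.2.foldl
        (fun idx lp' => idx.insert lp' ((idx.getD lp' PySem.Set.empty).add p.1)) idx) idx).getD lp PySem.Set.empty
      ↔ k ∈ idx.getD lp PySem.Set.empty ∨ ∃ q ∈ ms, q.1 = k ∧ lp ∈ q.2 := by
  induction ms generalizing idx with
  | nil => simp
  | cons p rest ih =>
    simp only [List.foldl_cons, ih, pvIndexInner, List.mem_cons]
    constructor
    · rintro ((h | ⟨rfl, h2⟩) | ⟨q, hq, h3, h4⟩)
      · exact Or.inl h
      · exact Or.inr ⟨p, Or.inl rfl, rfl, h2⟩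
      · exact Or.inr ⟨q, Or.inr hq, h3, h4⟩
    · rintro (h | ⟨q, hq | hq, h3, h4⟩)
      · exact Or.inl (Or.inl h)
      · subst hq; exact Or.inl (Or.inr ⟨h3.symm, h4⟩)
      · exact Or.inr ⟨q, hq, h3, h4⟩

theorem pvIndex_mem (mappings : List (Int × List (Int × Int))) (lp : Int × Int) (k : Int) :
    k ∈ (pvIndex mappings).getD lp PySem.Set.empty ↔ ∃ q ∈ mappings, q.1 = k ∧ lp ∈ q.2 := by
  rw [pvIndex, pvIndexFold]
  simp [PySem.Dict.getD_empty, PySem.Set.empty]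

theorem pvUnionFold (index : PySem.Dict (Int × Int) (PySem.Set Int)) (li : List (Int × Int))
    (s0 : PySem.Set Int) (k : Int) :
    k ∈ li.foldl (fun s lp => PySem.Set.union s (index.getD lp PySem.Set.empty)) s0
      ↔ k ∈ s0 ∨ ∃ lp ∈ li, k ∈ index.getD lp PySem.Set.empty := by
  induction li generalizing s0 with
  | nil => simp
  | cons l0 rest ih =>
    simp only [List.foldl_cons, ih, PySem.Set.mem_union, List.mem_cons]
    constructor
    · rintro ((h | h) | ⟨lp, hlp, h2⟩)
      · exact Or.inl h
      · exact Or.inr ⟨l0, Or.inl rfl, h⟩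
      · exact Or.inr ⟨lp, Or.inr hlp, h2⟩
    · rintro (h | ⟨lp, hlp | hlp, h2⟩)
      · exact Or.inl (Or.inl h)
      · subst hlp; exact Or.inl (Or.inr h2)
      · exact Or.inr ⟨lp, hlp, h2⟩

theorem pvNeighbors_mem (mappings : List (Int × List (Int × Int))) (p : Int × List (Int × Int)) (k : Int) :
    k ∈ pvNeighbors (pvIndex mappings) p ↔
      k ≠ p.1 ∧ ∃ lp ∈ p.2, ∃ q ∈ mappings, q.1 = k ∧ lp ∈ q.2 := by
  rw [pvNeighbors, PySem.Set.mem_discard, pvUnionFold]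
  simp only [PySem.Set.empty, List.not_mem_nil, false_or]
  constructor
  · rintro ⟨⟨lp, hlp, h2⟩, hne⟩
    exact ⟨hne, lp, hlp, (pvIndex_mem mappings lp k).1 h2⟩
  · rintro ⟨hne, lp, hlp, hq⟩
    exact ⟨⟨lp, hlp, (pvIndex_mem mappings lp k).2 hq⟩, hne⟩

-- the Boolean condition under which A's share loop inserts q
def pvCond (p q : Int × List (Int × Int)) : Bool :=
  !(q.1 == p.1) && pvShareScan (PySem.Dict.mk p.2) (PySem.Dict.mk q.2) (PySem.Dict.mk p.2).keys

theorem pvSet_contains_iff (s : PySem.Set Int) (x : Int) :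
    PySem.Set.contains s x = true ↔ x ∈ s := by
  simp [PySem.Set.contains]

-- pvCond agrees with membership in B's neighbour set, for entries of the dict
theorem pvCond_eq_contains (mappings : List (Int × List (Int × Int)))
    (HN : (mappings.map Prod.fst).Nodup)
    (HI : ∀ p ∈ mappings, (p.2.map Prod.fst).Nodup)
    (p : Int × List (Int × Int)) (hp : p ∈ mappings)
    (q : Int × List (Int × Int)) (hq : q ∈ mappings) :
    pvCond p q = PySem.Set.contains (pvNeighbors (pvIndex mappings) p) q.1 := by
  have hiff : pvCond p q = true ↔ q.1 ∈ pvNeighbors (pvIndex mappings) p := by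
    rw [pvCond, Bool.and_eq_true, Bool.not_eq_eq_eq_not, Bool.not_true, beq_eq_false_iff_ne,
      pvScan_iff p.2 (HI p hp), pvNeighbors_mem]
    constructor
    · rintro ⟨hne, lp, hlp, hget⟩
      exact ⟨hne, lp, hlp, q, hq, rfl, (pvGetMk q.2 (HI q hq) lp.1 lp.2).1 hget⟩
    · rintro ⟨hne, lp, hlp, q', hq', he, hmem⟩
      have heq : q' = q := pvUniq HN hq' hq he
      rw [heq] at hmem
      exact ⟨hne, lp, hlp, (pvGetMk q.2 (HI q hq) lp.1 lp.2).2 hmem⟩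
  rw [← pvSet_contains_iff] at hiff
  cases h1 : pvCond p q <;> cases h2 : PySem.Set.contains (pvNeighbors (pvIndex mappings) p) q.1
  · rfl
  · rw [h1, h2] at hiff; exact absurd (hiff.2 rfl) (by simp)
  · rw [h1, h2] at hiff; exact absurd (hiff.1 rfl) (by simp)
  · rfl

-- A's share-loop step is the single-condition insert
theorem pvShare_step_eq (p : Int × List (Int × Int)) :
    (fun (se : PySem.Dict Int (PySem.Dict Int Int)) (q : Int × List (Int × Int)) =>
      if q.1 == p.1 then se
      else if pvShareScan (PySem.Dict.mk p.2) (PySem.Dict.mk q.2) (PySem.Dict.mk p.2).keys then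
        se.insert q.1 (PySem.Dict.mk q.2)
      else se)
    = (fun se q => if pvCond p q then se.insert q.1 (PySem.Dict.mk q.2) else se) := by
  funext se q
  cases h1 : (q.1 == p.1) <;> simp [pvCond, h1]

-- a fold of guarded inserts with fresh distinct keys appends the filtered entries
theorem pvFoldIns (C : (Int × List (Int × Int)) → Bool)
    (l : List (Int × List (Int × Int))) :
    ∀ (se0 : PySem.Dict Int (PySem.Dict Int Int)),
    (∀ q ∈ l, C q = true → se0.contains q.1 = false) → (l.map Prod.fst).Nodup →
    (l.foldl (fun se q => if C q then se.insert q.1 (PySem.Dict.mk q.2) else se) se0).items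
      = se0.items ++ (l.filter C).map (fun q => (q.1, PySem.Dict.mk q.2)) := by
  induction l with
  | nil => intro se0 _ _; simp
  | cons q0 rest ih =>
    intro se0 hfresh hnd
    simp only [List.map_cons, List.nodup_cons] at hnd
    by_cases hC : C q0
    · have hni : se0.contains q0.1 = false := hfresh q0 (List.mem_cons_self) hC
      simp only [List.foldl_cons, if_pos hC, List.filter_cons_of_pos hC, List.map_cons]
      rw [ih (se0.insert q0.1 (PySem.Dict.mk q0.2)) ?_ hnd.2]
      · rw [PySem.Dict.items_insert_of_not_contains _ _ hni]
        simp
      · intro q hq hCq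
        rw [PySem.Dict.contains_insert]
        have : q.1 ≠ q0.1 := by
          intro he
          exact hnd.1 (he ▸ List.mem_map_of_mem (f := Prod.fst) hq)
        simp [this, hfresh q (List.mem_cons_of_mem _ hq) hCq]
    · simp only [List.foldl_cons, if_neg hC, List.filter_cons_of_neg hC]
      exact ih se0 (fun q hq => hfresh q (List.mem_cons_of_mem _ hq)) hnd.2
      
theorem pvShare_items (mappings : List (Int × List (Int × Int)))
    (HN : (mappings.map Prod.fst).Nodup) (p : Int × List (Int × Int)) :
    (pvShare mappings p).items
      = (p.1, PySem.Dict.mk p.2) ::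
        (mappings.filter (pvCond p)).map (fun q => (q.1, PySem.Dict.mk q.2)) := by
  rw [pvShare, pvShare_step_eq]
  rw [pvFoldIns (pvCond p) mappings _ ?_ HN]
  · rw [PySem.Dict.items_insert_of_not_contains _ _ (PySem.Dict.contains_empty _)]
    simp [PySem.Dict.empty]
  · intro q _ hCq
    rw [PySem.Dict.contains_insert]
    have : ¬ (q.1 == p.1) := by
      rw [pvCond, Bool.and_eq_true] at hCq
      simp only [Bool.not_eq_eq_eq_not, Bool.not_true] at hCq
      simp [hCq.1]
    simp [this, PySem.Dict.contains_empty]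

-- the combined positions/added fold of A splits into its two components
theorem pvFold2' (l : List (Int × PySem.Dict Int Int)) :
    ∀ (a : List Int) (pos : PySem.Dict Int Int),
    l.foldl
      (fun (st2 : List Int × PySem.Dict Int Int) q =>
        (st2.1 ++ [q.1], q.2.items.foldl (fun pos lp => pos.insert lp.1 lp.2) st2.2))
      (a, pos)
    = (a ++ l.map (fun q => q.1), l.foldl (fun pos q => pos.update q.2.items) pos) := by
  induction l with
  | nil => intro a pos; simp
  | cons q0 rest ih =>
    intro a pos
    rw [List.foldl_cons, ih]
    simp [PySem.Dict.update]

-- inserting a nodup-key pair list into the empty dict is that literal dict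
theorem pvEmptyUpdate (li : List (Int × Int)) (hli : (li.map Prod.fst).Nodup) :
    (PySem.Dict.empty : PySem.Dict Int Int).update li = PySem.Dict.mk li := by
  apply PySem.Dict.ext
  rw [PySem.Dict.update]
  rw [PySem.Dict.items_foldl_insert_fresh li Prod.fst Prod.snd _ (fun a _ => PySem.Dict.contains_empty _) hli]
  simp [PySem.Dict.empty]

-- a fold guarded by a Boolean key test folds over the filtered list
theorem pvFoldlIfUpd (C : (Int × List (Int × Int)) → Bool) (l : List (Int × List (Int × Int))) :
    ∀ (init : PySem.Dict Int Int),
    l.foldl (fun pos q => if C q = true then pos.update q.2 else pos) init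
      = (l.filter C).foldl (fun pos q => pos.update q.2) init := by
  induction l with
  | nil => intro init; simp
  | cons q0 rest ih =>
    intro init
    by_cases h : C q0
    · simp only [List.foldl_cons, if_pos h, List.filter_cons_of_pos h, ih]
    · simp only [List.foldl_cons, if_neg h, List.filter_cons_of_neg h, ih]

-- A's positions value equals B's positions value
theorem pvPositions_eq (mappings : List (Int × List (Int × Int)))
    (HN : (mappings.map Prod.fst).Nodup)
    (HI : ∀ p ∈ mappings, (p.2.map Prod.fst).Nodup)
    (p : Int × List (Int × Int)) (hp : p ∈ mappings) :
    (pvShare mappings p).items.foldl (fun pos q => pos.update q.2.items) PySem.Dict.empty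
      = mappings.foldl
          (fun pos q =>
            if PySem.Set.contains (pvNeighbors (pvIndex mappings) p) q.1 then pos.update q.2 else pos)
          (PySem.Dict.mk p.2) := by
  have hC : mappings.filter (pvCond p)
      = mappings.filter (fun q => PySem.Set.contains (pvNeighbors (pvIndex mappings) p) q.1) :=
    List.filter_congr (fun q hq => pvCond_eq_contains mappings HN HI p hp q hq)
  rw [pvShare_items mappings HN p]
  simp only [List.foldl_cons, List.foldl_map]
  rw [show (PySem.Dict.empty : PySem.Dict Int Int).update (PySem.Dict.mk p.2).items = PySem.Dict.mk p.2
    from by simpa using pvEmptyUpdate p.2 (HI p hp)]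
  rw [hC]
  exact (pvFoldlIfUpd (fun q => PySem.Set.contains (pvNeighbors (pvIndex mappings) p) q.1) mappings (PySem.Dict.mk p.2)).symm

-- the two branch conditions agree
theorem pvBranch_iff (mappings : List (Int × List (Int × Int)))
    (HN : (mappings.map Prod.fst).Nodup)
    (HI : ∀ p ∈ mappings, (p.2.map Prod.fst).Nodup)
    (p : Int × List (Int × Int)) (hp : p ∈ mappings) :
    ((pvShare mappings p).size = 1 ↔ (pvNeighbors (pvIndex mappings) p).isEmpty = true) := by
  have hsz : (pvShare mappings p).size
      = 1 + ((mappings.filter (pvCond p)).map (fun q => (q.1, PySem.Dict.mk q.2))).length := by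
    show (pvShare mappings p).items.length = _
    rw [pvShare_items mappings HN p]
    simp [Nat.add_comm]
  rw [hsz, List.isEmpty_iff]
  constructor
  · intro h
    have hf : (mappings.filter (pvCond p)) = [] := by
      have : ((mappings.filter (pvCond p)).map (fun q => (q.1, PySem.Dict.mk q.2))).length = 0 := by omega
      simpa using this
    rw [List.eq_nil_iff_forall_not_mem]
    intro k hk
    obtain ⟨hne, lp, hlp, q, hq, he, hmem⟩ := (pvNeighbors_mem mappings p k).1 hk
    have hc : pvCond p q = true := by
      rw [pvCond_eq_contains mappings HN HI p hp q hq, pvSet_contains_iff, he]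
      exact hk
    have : q ∈ mappings.filter (pvCond p) := List.mem_filter.2 ⟨hq, hc⟩
    rw [hf] at this
    cases this
  · intro h
    have : mappings.filter (pvCond p) = [] := by
      apply List.filter_eq_nil_iff.2
      intro q hq
      rw [pvCond_eq_contains mappings HN HI p hp q hq]
      simp [h]
    rw [this]
    simp
    
-- main loop invariant: the two folds produce the same new_mappings dict
theorem pvMain (mappings : List (Int × List (Int × Int)))
    (HN : (mappings.map Prod.fst).Nodup)
    (HI : ∀ p ∈ mappings, (p.2.map Prod.fst).Nodup) :
    ∀ (rest : List (Int × List (Int × Int)))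
      (_ : ∀ q ∈ rest, q ∈ mappings) (_ : (rest.map Prod.fst).Nodup)
      (nm : PySem.Dict Int (PySem.Dict Int Int)) (aA : List Int) (aB : PySem.Set Int)
      (_ : ∀ q ∈ rest, (q.1 ∈ aA ↔ q.1 ∈ aB)),
      (rest.foldl (pvAStep mappings) (nm, aA)).1
        = (rest.foldl (pvBStep mappings (pvIndex mappings)) (nm, aB)).1 := by
  intro rest
  induction rest with
  | nil => intro _ _ nm aA aB _; rfl
  | cons p rest' ih =>
    intro hsub hnd nm aA aB hinv
    have hp : p ∈ mappings := hsub p List.mem_cons_self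
    have hsub' : ∀ q ∈ rest', q ∈ mappings := fun q hq => hsub q (List.mem_cons_of_mem _ hq)
    simp only [List.map_cons, List.nodup_cons] at hnd
    have hnotin : ∀ q ∈ rest', q.1 ≠ p.1 := by
      intro q hq he
      exact hnd.1 (he ▸ List.mem_map_of_mem (f := Prod.fst) hq)
    simp only [List.foldl_cons]
    by_cases hb : (pvNeighbors (pvIndex mappings) p).isEmpty = true
    · -- singleton branch on both sides
      have hA : pvAStep mappings (nm, aA) p
          = (nm.insert p.1 (PySem.Dict.mk p.2), aA ++ [p.1]) := by
        rw [pvAStep]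
        simp only [if_pos ((pvBranch_iff mappings HN HI p hp).2 hb)]
      have hB : pvBStep mappings (pvIndex mappings) (nm, aB) p
          = (nm.insert p.1 (PySem.Dict.mk p.2), aB) := by
        rw [pvBStep]
        simp only [if_pos hb]
      rw [hA, hB]
      apply ih hsub' hnd.2
      intro q hq
      have := hinv q (List.mem_cons_of_mem _ hq)
      simp only [List.mem_append, List.mem_singleton]
      constructor
      · rintro (h | h)
        · exact this.1 h
        · exact absurd h (hnotin q hq)
      · intro h; exact Or.inl (this.2 h)
    · have hbn : ¬ (pvShare mappings p).size = 1 := by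
        intro h; exact hb ((pvBranch_iff mappings HN HI p hp).1 h)
      by_cases hin : p.1 ∈ aA
      · -- skip branch on both sides
        have hinB : PySem.Set.contains aB p.1 = true :=
          (pvSet_contains_iff aB p.1).2 ((hinv p List.mem_cons_self).1 hin)
        have hA : pvAStep mappings (nm, aA) p = (nm, aA) := by
          rw [pvAStep]
          simp only [if_neg hbn, if_pos hin]
        have hB : pvBStep mappings (pvIndex mappings) (nm, aB) p = (nm, aB) := by
          rw [pvBStep]
          simp only [if_neg hb, if_pos hinB]
        rw [hA, hB]
        apply ih hsub' hnd.2
        intro q hq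
        exact hinv q (List.mem_cons_of_mem _ hq)
      · -- group branch on both sides
        have hinB : ¬ PySem.Set.contains aB p.1 = true := by
          intro h
          exact hin ((hinv p List.mem_cons_self).2 ((pvSet_contains_iff aB p.1).1 h))
        have hA : pvAStep mappings (nm, aA) p
            = (nm.insert p.1
                ((pvShare mappings p).items.foldl (fun pos q => pos.update q.2.items) PySem.Dict.empty),
               aA ++ (pvShare mappings p).items.map (fun q => q.1)) := by
          rw [pvAStep]
          simp only [if_neg hbn, if_neg hin]
          rw [pvFold2']
        have hB : pvBStep mappings (pvIndex mappings) (nm, aB) p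
            = (nm.insert p.1
                (mappings.foldl
                  (fun pos q =>
                    if PySem.Set.contains (pvNeighbors (pvIndex mappings) p) q.1 then pos.update q.2 else pos)
                  (PySem.Dict.mk p.2)),
               PySem.Set.union aB (pvNeighbors (pvIndex mappings) p)) := by
          rw [pvBStep]
          simp only [if_neg hb, if_neg hinB]
        rw [hA, hB, pvPositions_eq mappings HN HI p hp]
        apply ih hsub' hnd.2
        intro q hq
        have hbase := hinv q (List.mem_cons_of_mem _ hq)
        have hqm : q ∈ mappings := hsub' q hq
        rw [pvShare_items mappings HN p]
        simp only [List.mem_append, List.map_cons, List.map_map, List.mem_cons,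
          PySem.Set.mem_union]
        constructor
        · rintro (h | h | h)
          · exact Or.inl (hbase.1 h)
          · exact absurd h (hnotin q hq)
          · -- q.1 occurs among the filtered share keys, so q itself satisfies pvCond
            simp only [List.mem_map, Function.comp] at h
            obtain ⟨q', hq', he⟩ := h
            have hq'm := List.mem_filter.1 hq'
            have : q' = q := pvUniq HN hq'm.1 hqm he
            subst this
            have := hq'm.2
            rw [pvCond_eq_contains mappings HN HI p hp q' hq'm.1, pvSet_contains_iff] at this
            exact Or.inr this
        · rintro (h | h)
          · exact Or.inl (hbase.2 h)
          · right; right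
            have hc : pvCond p q = true := by
              rw [pvCond_eq_contains mappings HN HI p hp q hqm, pvSet_contains_iff]
              exact h
            simp only [List.mem_map, Function.comp]
            exact ⟨q, List.mem_filter.2 ⟨hqm, hc⟩, rfl⟩

-- ===== VERDICT (by name: the statement is the Claim_ definition above) =====
theorem combine_interactions_py_spec : Claim_equal_combine_interactions_py := by
  intro mappings _ hpre
  unfold Spec_combine_interactions_py
  unfold combine_interactions_py combine_interactions_py_alt
  have := pvMain mappings hpre.1 hpre.2 mappings (fun q hq => hq) hpre.1
    PySem.Dict.empty [] PySem.Set.empty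
    (by intro q _; simp [PySem.Set.empty])
  rw [this]
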